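-- pv_equiv track=rewrite | github.com/amal-mohan/Natural-Language-Processing-Util | templateFiller.py | getDepChildren
-- ===== SOURCE A (Python) =====
-- def getDepChildren(dependencyDict,value,count):
-- 	deplist=[]
-- 	deplist.append(value)
-- 	if value not in dependencyDict or count==100:
-- 		return deplist
-- 	for depkey in dependencyDict[value]:
-- 		deplist.append(dependencyDict[value][depkey])
-- 		deplist.extend(getDepChildren(dependencyDict,dependencyDict[value][depkey],count+1))
--
-- 	return list(set(deplist))
-- ===== SOURCE B (Python) =====
-- def getDepChildren(dependencyDict, value, count):
--     # Iterative re-implementation: one explicit worklist of (node, depth) pairs and a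
--     # single result set, instead of recursion with a list(set(...)) rebuild per level.
--     result = set()
--     stack = [(value, count)]
--     while stack:
--         node, c = stack.pop()
--         result.add(node)
--         if node not in dependencyDict or c == 100:
--             continue
--         children = [dependencyDict[node][depkey] for depkey in dependencyDict[node]]
--         for child in reversed(children):
--             stack.append((child, c + 1))
--     return list(result)
-- ===== Notes on version B (the rewrite author's own statement) =====
-- stated objective: alternative
-- what changed: A's recursion, which rebuilds list(set(...)) at every level of the dependency expansion, is replaced by a single iterative worklist (stack of (node, depth) pairs) that accumulates one result set; no recursion and only one deduplication structure.
-- outside the precondition, e.g. on getDepChildren({'a': {}}, 'a', 101): A returns ['a'], B returns ['a']; on getDepChildren({'a': {'k': 'a'}}, 'a', -9001): A returns ['a'], B returns ['a']; on getDepChildren({'a': {'k': 'a'}}, 'a', -20000): A raises RecursionError, B returns ['a']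
import Mathlib
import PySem

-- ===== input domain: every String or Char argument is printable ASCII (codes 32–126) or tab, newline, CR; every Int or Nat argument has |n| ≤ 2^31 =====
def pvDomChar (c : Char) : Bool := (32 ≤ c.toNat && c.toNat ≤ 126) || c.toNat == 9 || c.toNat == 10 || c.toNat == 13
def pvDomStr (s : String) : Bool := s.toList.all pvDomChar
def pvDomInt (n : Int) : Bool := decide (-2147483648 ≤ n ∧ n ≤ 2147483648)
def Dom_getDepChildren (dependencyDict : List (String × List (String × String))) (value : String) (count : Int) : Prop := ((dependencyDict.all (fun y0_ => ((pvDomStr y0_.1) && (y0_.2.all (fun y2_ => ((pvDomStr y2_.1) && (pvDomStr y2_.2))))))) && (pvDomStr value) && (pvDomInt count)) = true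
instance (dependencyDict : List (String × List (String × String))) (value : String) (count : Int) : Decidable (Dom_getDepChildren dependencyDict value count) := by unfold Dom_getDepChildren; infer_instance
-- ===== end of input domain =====

-- B replaces A's recursion (which rebuilds list(set(...)) at every level) by a single
-- iterative worklist traversal that accumulates one result set; return value only is
-- compared (neither version mutates its arguments).

-- ===== PORT A =====
-- A-side helper: A's recursion, on an explicit fuel counter; under Pre_ the starting fuel
-- (100 - count).toNat + 1 never runs out before the `count == 100` stop fires, so the
-- fuel-0 branch is unreachable on admitted inputs.
def getDepChildrenGo (dependencyDict : List (String × List (String × String))) :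
    Nat → String → Int → List String
  | 0, value, _ => [value]
  | fuel + 1, value, count =>
    let deplist := [value]
    if ¬ (PySem.Dict.mk dependencyDict).contains value || count == 100 then deplist
    else
      let inner := (PySem.Dict.mk dependencyDict).getD value []
      -- `for depkey in dependencyDict[value]: … dependencyDict[value][depkey]`:
      -- depkey ranges over inner's own keys, so the lookup never raises; `getD … ""` is exact.
      let deplist := ((PySem.Dict.mk inner).keys).foldl
        (fun acc depkey =>
          let child := (PySem.Dict.mk inner).getD depkey ""
          acc ++ [child] ++ getDepChildrenGo dependencyDict fuel child (count + 1))
        deplist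
      PySem.Set.ofList deplist   -- list(set(deplist)); outputs are compared as sets

def getDepChildren (dependencyDict : List (String × List (String × String))) (value : String) (count : Int) : List String :=
  getDepChildrenGo dependencyDict ((100 - count).toNat + 1) value count

-- ===== PORT B =====
-- B-side helpers: max inner-dict size (used only to size the loop's fuel) and the worklist loop.
def getDepChildrenWidth (dependencyDict : List (String × List (String × String))) : Nat :=
  dependencyDict.foldl (fun m p => max m p.2.length) 0

def getDepChildrenLoop (dependencyDict : List (String × List (String × String))) :
    Nat → List (String × Int) → PySem.Set String → PySem.Set String
  | 0, _, result => result
  | fuel + 1, stack, result =>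
    match stack.getLast? with
    | none => result                                -- while stack: … exits
    | some (node, c) =>
      let stack' := stack.dropLast                  -- node, c = stack.pop()
      let result' := PySem.Set.add result node      -- result.add(node)
      if ¬ (PySem.Dict.mk dependencyDict).contains node || c == 100 then
        getDepChildrenLoop dependencyDict fuel stack' result'
      else
        let inner := (PySem.Dict.mk dependencyDict).getD node []
        let children := ((PySem.Dict.mk inner).keys).map (fun k => (PySem.Dict.mk inner).getD k "")
        getDepChildrenLoop dependencyDict fuel
          (stack' ++ children.reverse.map (fun ch => (ch, c + 1))) result'

def getDepChildren_alt (dependencyDict : List (String × List (String × String))) (value : String) (count : Int) : List String :=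
  -- fuel is a totality guard only: the loop runs once per node of the depth-limited
  -- expansion tree (branching ≤ width, depth ≤ (100 - count) + 1 on admitted inputs).
  getDepChildrenLoop dependencyDict
    ((getDepChildrenWidth dependencyDict + 1) ^ ((100 - max count (-9000)).toNat + 1))
    [(value, count)] PySem.Set.empty

-- ===== PRECONDITION & SPEC =====
-- Pre_ excludes inputs whose start value is a dict key while count lies outside [-9000, 100]:
-- A's depth stop fires only at exactly 100, so for count > 100 A recurses without bound on any
-- reachable cycle (RecursionError, B's loop diverges), and for count < -9000 the up-to
-- (100 - count)-deep recursion can exceed Python's recursion limit on cyclic inputs; on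
-- acyclic inputs outside this window both programs still agree.
def Pre_getDepChildren (dependencyDict : List (String × List (String × String))) (value : String) (count : Int) : Prop :=
  (-9000 ≤ count ∧ count ≤ 100) ∨ (PySem.Dict.mk dependencyDict).contains value = false
instance (dependencyDict : List (String × List (String × String))) (value : String) (count : Int) : Decidable (Pre_getDepChildren dependencyDict value count) := by unfold Pre_getDepChildren; infer_instance

def pvWitness_getDepChildren : (List (String × List (String × String))) × String × Int :=
  ([("a", [("nsubj", "b"), ("dobj", "c")]), ("b", [("amod", "c")])], "a", 0)

def Spec_getDepChildren (dependencyDict : List (String × List (String × String))) (value : String) (count : Int) (out : List String) : Prop := out = getDepChildren_alt dependencyDict value count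
instance (dependencyDict : List (String × List (String × String))) (value : String) (count : Int) (out : List String) : Decidable (Spec_getDepChildren dependencyDict value count out) := by unfold Spec_getDepChildren; infer_instance

-- ===== CLAIM (what is proved, stated in full; the proofs are below) =====
def Claim_equal_getDepChildren : Prop := ∀ (dependencyDict : List (String × List (String × String))) (value : String) (count : Int), Dom_getDepChildren dependencyDict value count → Pre_getDepChildren dependencyDict value count → Spec_getDepChildren dependencyDict value count (getDepChildren dependencyDict value count)

-- ===== LEMMAS AND PROOFS =====

-- The canonical depth-limited preorder sequence both ports reduce to.
def depSeq (dependencyDict : List (String × List (String × String))) :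
    Nat → String → Int → List String
  | 0, v, _ => [v]
  | fuel + 1, v, c =>
    v :: (if ¬ (PySem.Dict.mk dependencyDict).contains v || c == 100 then []
      else
        let inner := (PySem.Dict.mk dependencyDict).getD v []
        (((PySem.Dict.mk inner).keys).map (fun k => (PySem.Dict.mk inner).getD k "")).flatMap
          (fun ch => depSeq dependencyDict fuel ch (c + 1)))

theorem add_of_mem {s : PySem.Set String} {x : String} (h : x ∈ s) : s.add x = s := by
  simp [PySem.Set.add, PySem.Set.contains, h]

theorem mem_self_add (s : PySem.Set String) (x : String) : x ∈ s.add x := by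
  simp [PySem.Set.mem_add]

theorem mem_foldl_add (l : List String) (s : PySem.Set String) (y : String) :
    y ∈ l.foldl PySem.Set.add s ↔ y ∈ s ∨ y ∈ l := by
  induction l generalizing s with
  | nil => simp
  | cons x l ih => simp only [List.foldl_cons, ih, PySem.Set.mem_add, List.mem_cons]; tauto

-- folding the elements of `t.add x` into `s` = folding t's elements, then adding x
theorem foldl_add_addArg (t : PySem.Set String) (x : String) (s : PySem.Set String) :
    List.foldl PySem.Set.add s (t.add x) = (List.foldl PySem.Set.add s t).add x := by
  by_cases hx : x ∈ t
  · rw [add_of_mem hx, add_of_mem ((mem_foldl_add t s x).mpr (Or.inr hx))]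
  · rw [show t.add x = t ++ [x] by simp [PySem.Set.add, PySem.Set.contains, hx]]
    simp [List.foldl_append, PySem.Set.add]

theorem foldl_add_foldl (l : List String) (t s : PySem.Set String) :
    List.foldl PySem.Set.add s (List.foldl PySem.Set.add t l)
      = List.foldl PySem.Set.add (List.foldl PySem.Set.add s t) l := by
  induction l generalizing t with
  | nil => rfl
  | cons x l ih => simp only [List.foldl_cons, ih, foldl_add_addArg]

-- folding a deduplicated list = folding the list itself
theorem foldl_add_ofList (l : List String) (s : PySem.Set String) :
    List.foldl PySem.Set.add s (PySem.Set.ofList l) = List.foldl PySem.Set.add s l := by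
  rw [PySem.Set.ofList_eq_foldl, foldl_add_foldl]; rfl

theorem depSeq_cons (d : List (String × List (String × String))) (f : Nat) (v : String) (c : Int) :
    ∃ t, depSeq d f v c = v :: t := by
  cases f <;> simp [depSeq]

-- each child's `child :: list(set(subtree))` contributes the same set-fold as the raw subtree
theorem foldl_add_flatMap_cons (d : List (String × List (String × String))) (f : Nat) (c : Int)
    (ks : List String) (g : String → String) (s : PySem.Set String) :
    List.foldl PySem.Set.add s
        (ks.flatMap (fun k => g k :: PySem.Set.ofList (depSeq d f (g k) c)))
      = List.foldl PySem.Set.add s (ks.flatMap (fun k => depSeq d f (g k) c)) := by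
  induction ks generalizing s with
  | nil => rfl
  | cons k rest ih =>
    obtain ⟨t, ht⟩ := depSeq_cons d f (g k) c
    simp only [List.flatMap_cons, List.foldl_append, List.foldl_cons]
    rw [foldl_add_ofList, ht, List.foldl_cons, List.foldl_cons,
      add_of_mem (mem_self_add s (g k)), ih]

-- PORT A computes the dedup (in first-occurrence order) of the preorder sequence
theorem go_eq_ofList_depSeq (d : List (String × List (String × String))) :
    ∀ (f : Nat) (v : String) (c : Int),
      getDepChildrenGo d f v c = PySem.Set.ofList (depSeq d f v c) := by
  intro f
  induction f with
  | zero => intro v c; simp [getDepChildrenGo, depSeq, PySem.Set.ofList_eq_foldl, PySem.Set.add,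
      PySem.Set.contains]
  | succ f ih =>
    intro v c
    simp only [getDepChildrenGo, depSeq]
    split
    · simp [PySem.Set.ofList_eq_foldl, PySem.Set.add, PySem.Set.contains]
    · simp only [List.append_assoc, PySem.List.foldl_append_eq_flatMap, ih,
        List.singleton_append]
      rw [PySem.Set.ofList_eq_foldl, PySem.Set.ofList_eq_foldl, List.foldl_cons, List.foldl_cons,
        foldl_add_flatMap_cons, List.flatMap_map]

-- B-side proof bookkeeping: cost (number of loop iterations) and meaning of a stack entry
def entryCost (d : List (String × List (String × String))) (e : String × Int) : Nat :=
  (depSeq d ((100 - e.2).toNat + 1) e.1 e.2).length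

def stackFold (d : List (String × List (String × String))) (st : List (String × Int))
    (r : PySem.Set String) : PySem.Set String :=
  st.foldr (fun e r' => List.foldl PySem.Set.add r' (depSeq d ((100 - e.2).toNat + 1) e.1 e.2)) r

theorem entryCost_pos (d : List (String × List (String × String))) (e : String × Int) :
    1 ≤ entryCost d e := by
  obtain ⟨t, ht⟩ := depSeq_cons d ((100 - e.2).toNat + 1) e.1 e.2
  simp [entryCost, ht]

theorem le_foldl_max2 (l : List (String × List (String × String))) :
    ∀ m : Nat, m ≤ l.foldl (fun m p => max m p.2.length) m := by
  induction l with
  | nil => intro m; exact le_refl m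
  | cons p l ih =>
    intro m
    exact le_trans (le_max_left m p.2.length) (ih _)

theorem getD_len_le (l : List (String × List (String × String))) :
    ∀ (v : String) (m : Nat),
      ((PySem.Dict.mk l).getD v []).length ≤ l.foldl (fun m p => max m p.2.length) m := by
  induction l with
  | nil => intro v m; simp [PySem.Dict.getD, PySem.Dict.get?]
  | cons p l ih =>
    intro v m
    rw [PySem.Dict.getD_eq_get?_getD, PySem.Dict.get?_mk_cons]
    by_cases h : (p.1 == v) = true
    · simp only [h, if_pos]
      exact le_trans (le_trans (le_max_right m p.2.length) (le_foldl_max2 l _))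
        (le_of_eq (by simp [List.foldl_cons]))
    · simp only [h, if_neg, Bool.not_eq_true, ← PySem.Dict.getD_eq_get?_getD]
      simpa using ih v (max m p.2.length)

theorem len_depSeq_le (d : List (String × List (String × String))) :
    ∀ (f : Nat) (v : String) (c : Int),
      (depSeq d f v c).length ≤ (getDepChildrenWidth d + 1) ^ f := by
  intro f
  induction f with
  | zero => intro v c; simp [depSeq]
  | succ f ih =>
    intro v c
    simp only [depSeq]
    split
    · simp [Nat.one_le_pow]
    · simp only [List.length_cons, List.length_flatMap]
      have hkeys : ((PySem.Dict.mk ((PySem.Dict.mk d).getD v [])).keys).length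
          ≤ getDepChildrenWidth d := by
        have h1 : ((PySem.Dict.mk ((PySem.Dict.mk d).getD v [])).keys).length
            = ((PySem.Dict.mk d).getD v []).length := by
          simp [PySem.Dict.keys, PySem.Dict.items]
        rw [h1]
        exact getD_len_le d v 0
      have hsum : ((((PySem.Dict.mk ((PySem.Dict.mk d).getD v [])).keys).map
            (fun k => (PySem.Dict.mk ((PySem.Dict.mk d).getD v [])).getD k "")).map
            (fun a => (depSeq d f a (c + 1)).length)).sum
          ≤ getDepChildrenWidth d * (getDepChildrenWidth d + 1) ^ f := by
        calc _ ≤ ((((PySem.Dict.mk ((PySem.Dict.mk d).getD v [])).keys).map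
                (fun k => (PySem.Dict.mk ((PySem.Dict.mk d).getD v [])).getD k "")).map
                (fun a => (depSeq d f a (c + 1)).length)).length
                  • ((getDepChildrenWidth d + 1) ^ f) := by
              apply List.sum_le_card_nsmul
              intro x hx
              simp only [List.mem_map] at hx
              obtain ⟨a, _, rfl⟩ := hx
              exact ih _ _
          _ ≤ getDepChildrenWidth d * (getDepChildrenWidth d + 1) ^ f := by
              simp only [List.length_map, smul_eq_mul]
              exact Nat.mul_le_mul_right _ hkeys
      have h1 : 1 ≤ (getDepChildrenWidth d + 1) ^ f := Nat.one_le_pow _ _ (Nat.succ_pos _)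
      have h2 : (getDepChildrenWidth d + 1) ^ (f + 1)
          = (getDepChildrenWidth d + 1) ^ f + getDepChildrenWidth d * (getDepChildrenWidth d + 1) ^ f := by
        ring
      omega

theorem sum_map_map_reverse {α β γ : Type} [AddCommMonoid γ] (l : List α) (g : α → β) (h : β → γ) :
    ((l.reverse.map g).map h).sum = ((l.map g).map h).sum := by
  simp [List.map_reverse, List.sum_reverse]

-- the fold over pushed children equals the flat set-fold over their subsequences
theorem foldr_children (d : List (String × List (String × String))) (c : Int) :
    ∀ (children : List String) (s : PySem.Set String),
      List.foldr (fun e r' => List.foldl PySem.Set.add r' (depSeq d ((100 - e.2).toNat + 1) e.1 e.2)) s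
          (children.reverse.map (fun ch => (ch, c + 1)))
        = List.foldl PySem.Set.add s
            (children.flatMap (fun ch => depSeq d ((100 - (c + 1)).toNat + 1) ch (c + 1))) := by
  intro children
  induction children with
  | nil => intro s; rfl
  | cons ch rest ih =>
    intro s
    simp only [List.reverse_cons, List.map_append, List.foldr_append, List.flatMap_cons,
      List.foldl_append, List.map_cons, List.map_nil, List.foldr_cons, List.foldr_nil]
    exact ih _

-- PORT B's loop, given enough fuel, folds each stack entry's preorder sequence into the
-- result set, last entry (top of stack) first
theorem loop_eq_stackFold (d : List (String × List (String × String))) :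
    ∀ (fuel : Nat) (st : List (String × Int)) (r : PySem.Set String),
      (∀ e ∈ st, e.2 ≤ 100) → (st.map (entryCost d)).sum ≤ fuel →
      getDepChildrenLoop d fuel st r = stackFold d st r := by
  intro fuel
  induction fuel with
  | zero =>
    intro st r hc hf
    match st with
    | [] => rfl
    | e :: st' =>
      exfalso
      have := entryCost_pos d e
      simp only [List.map_cons, List.sum_cons, Nat.le_zero] at hf
      omega
  | succ fuel ih =>
    intro st r hc hf
    cases hL : st.getLast? with
    | none =>
      rw [List.getLast?_eq_none_iff] at hL
      subst hL
      rfl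
    | some e =>
      obtain ⟨n, c⟩ := e
      have hdec : st.dropLast ++ [(n, c)] = st := List.dropLast_append_getLast? _ hL
      have hmemlast : (n, c) ∈ st := by
        rw [← hdec]; exact List.mem_append_right _ (List.mem_singleton.mpr rfl)
      have hsum : ((st.dropLast.map (entryCost d)).sum + entryCost d (n, c)) ≤ fuel + 1 := by
        calc (st.dropLast.map (entryCost d)).sum + entryCost d (n, c)
            = ((st.dropLast ++ [(n, c)]).map (entryCost d)).sum := by
              simp [List.map_append]
          _ ≤ fuel + 1 := by rw [hdec]; exact hf
      have hcd : ∀ e ∈ st.dropLast, e.2 ≤ 100 := fun e he => hc e (List.mem_of_mem_dropLast he)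
      have hfold : stackFold d st r
          = stackFold d st.dropLast
              (List.foldl PySem.Set.add r (depSeq d ((100 - c).toNat + 1) n c)) := by
        rw [← hdec]
        simp [stackFold, List.foldr_append]
      simp only [getDepChildrenLoop, hL]
      split
      · -- stopped node: its sequence is the singleton [n]
        rename_i hstop
        have hseq : depSeq d ((100 - c).toNat + 1) n c = [n] := by
          simp only [depSeq]
          rw [if_pos hstop]
        rw [hfold, hseq]
        have h1 : entryCost d (n, c) = 1 := by simp [entryCost, hseq]
        rw [ih st.dropLast _ hcd (by omega)]
        rfl
      · -- expanded node
        rename_i hgo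
        have hc100 : c ≠ 100 := by
          intro h
          subst h
          simp at hgo
        have hcle : c ≤ 100 := hc (n, c) hmemlast
        have htoNat : (100 - c).toNat = (100 - (c + 1)).toNat + 1 := by omega
        have hseq : depSeq d ((100 - c).toNat + 1) n c
            = n :: (((PySem.Dict.mk ((PySem.Dict.mk d).getD n [])).keys).map
                  (fun k => (PySem.Dict.mk ((PySem.Dict.mk d).getD n [])).getD k "")).flatMap
                (fun ch => depSeq d ((100 - (c + 1)).toNat + 1) ch (c + 1)) := by
          conv_lhs => rw [htoNat]
          simp only [depSeq]
          rw [if_neg hgo]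
        have hcost : entryCost d (n, c)
            = 1 + (((((PySem.Dict.mk ((PySem.Dict.mk d).getD n [])).keys).map
                  (fun k => (PySem.Dict.mk ((PySem.Dict.mk d).getD n [])).getD k "")).map
                  (fun ch => (ch, c + 1))).map (entryCost d)).sum := by
          simp only [entryCost, hseq, List.length_cons, List.length_flatMap, List.map_map,
            Function.comp_def]
          omega
        have hc2 : ∀ e ∈ st.dropLast ++ ((((PySem.Dict.mk ((PySem.Dict.mk d).getD n [])).keys).map
              (fun k => (PySem.Dict.mk ((PySem.Dict.mk d).getD n [])).getD k "")).reverse.map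
              (fun ch => (ch, c + 1))), e.2 ≤ 100 := by
          intro e he
          rcases List.mem_append.mp he with h1 | h1
          · exact hcd e h1
          · simp only [List.mem_map, List.mem_reverse] at h1
            obtain ⟨a, _, rfl⟩ := h1
            omega
        have hf2 : ((st.dropLast ++ ((((PySem.Dict.mk ((PySem.Dict.mk d).getD n [])).keys).map
              (fun k => (PySem.Dict.mk ((PySem.Dict.mk d).getD n [])).getD k "")).reverse.map
              (fun ch => (ch, c + 1)))).map (entryCost d)).sum ≤ fuel := by
          simp only [List.map_append, List.sum_append, sum_map_map_reverse]
          omega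
        rw [ih (st.dropLast ++ ((((PySem.Dict.mk ((PySem.Dict.mk d).getD n [])).keys).map
              (fun k => (PySem.Dict.mk ((PySem.Dict.mk d).getD n [])).getD k "")).reverse.map
              (fun ch => (ch, c + 1)))) (PySem.Set.add r n) hc2 hf2]
        rw [hfold, hseq]
        simp only [stackFold, List.foldr_append, List.foldl_cons]
        rw [foldr_children]

theorem loop_nil (d : List (String × List (String × String))) :
    ∀ (f : Nat) (r : PySem.Set String), getDepChildrenLoop d f [] r = r := by
  intro f r
  cases f <;> rfl

-- ===== VERDICT (by name: the statement is the Claim_ definition above) =====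
theorem getDepChildren_spec : Claim_equal_getDepChildren := by
  intro d v c _hdom hpre
  unfold Spec_getDepChildren
  by_cases hin : (PySem.Dict.mk d).contains v = true
  · -- the start value is a key: Pre_'s count window applies
    have hw : -9000 ≤ c ∧ c ≤ 100 := by
      rcases hpre with h | h
      · exact h
      · rw [hin] at h; cases h
    obtain ⟨h1, h2⟩ := hw
    have hmax : max c (-9000) = c := by omega
    unfold getDepChildren getDepChildren_alt
    rw [hmax, go_eq_ofList_depSeq]
    rw [loop_eq_stackFold d _ [(v, c)] _ (by intro e he; simp only [List.mem_singleton] at he; subst he; simpa using h2)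
      (by simpa [entryCost] using len_depSeq_le d ((100 - c).toNat + 1) v c)]
    unfold stackFold
    simp only [List.foldr_cons, List.foldr_nil]
    rw [PySem.Set.ofList_eq_foldl]
    rfl
  · -- the start value is not a key: both sides return [value] at once
    unfold getDepChildren getDepChildren_alt
    rw [Bool.not_eq_true] at hin
    simp only [getDepChildrenGo, hin]
    cases hF : (getDepChildrenWidth d + 1) ^ ((100 - max c (-9000)).toNat + 1) with
    | zero => exact absurd hF (Nat.pow_pos (Nat.succ_pos _)).ne'
    | succ f =>
      simp only [getDepChildrenLoop, List.getLast?_singleton, hin]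
      simp [loop_nil, PySem.Set.add, PySem.Set.contains, PySem.Set.empty]
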